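-- pv_equiv track=rewrite | github.com/TwoLion/Coding-Study | Week 2/Problem kakao - Week 2 다시풀기.py | solution
-- ===== SOURCE A (Python) =====
-- def solution(food_times, k):
--
--   result = 0
--
--   while k > 0 :
--
--     min_val_list = [i for i in food_times if i not in set([0])]
--
--     if min_val_list==[]:
--
--       result = -1
--       break
--
--     min_val = min(min_val_list)
--
--     if k-len(min_val_list)*min_val<0:
--       break
--
--     else:
--
--       food_times = list(map(lambda x:(x-min_val)*((x-min_val)>=0), food_times))
--       k += -len(min_val_list)*min_val
--
--
--   comp = 0
--   index = 0
--   for i in range(len(food_times)):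
--     if food_times[i]>0:
--       comp+=1
--       index +=1
--     else:
--       comp+=1
--       pass
--
--     if index == k+1:
--       break
--
--   if result==-1:
--     comp = -1
--
--
--
--   return(comp)
-- ===== SOURCE B (Python) =====
-- def solution(food_times, k):
--     # Drain whole levels of the sorted distinct values at once, then scan once
--     # for the (k+1)-th food still above the last fully drained level.
--     cnt = {}
--     for x in food_times:
--         cnt[x] = cnt.get(x, 0) + 1
--     total = len(food_times)
--     base = 0
--     rem = total - cnt.get(0, 0)  # foods that still need eating
--     done = 0                     # foods at or below the current base
--     broke = False
--     for v in sorted(set(food_times)):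
--         if k <= 0:
--             break
--         cost = (v - base) * rem
--         if k - cost < 0:
--             broke = True
--             break
--         k -= cost
--         base = v
--         done += cnt[v]
--         rem = total - done
--     if k > 0 and not broke:
--         return -1
--     comp = 0
--     idx = 0
--     for x in food_times:
--         comp += 1
--         if x > base:
--             idx += 1
--         if idx == k + 1:
--             return comp
--     return comp
-- ===== Notes on version B (the rewrite author's own statement) =====
-- stated objective: faster
-- what changed: Replaces A's repeated subtract-the-minimum simulation (which rescans and rewrites the whole list every round) with a single pass over the sorted distinct values using precomputed counts, followed by one final scan.
import Mathlib
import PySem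

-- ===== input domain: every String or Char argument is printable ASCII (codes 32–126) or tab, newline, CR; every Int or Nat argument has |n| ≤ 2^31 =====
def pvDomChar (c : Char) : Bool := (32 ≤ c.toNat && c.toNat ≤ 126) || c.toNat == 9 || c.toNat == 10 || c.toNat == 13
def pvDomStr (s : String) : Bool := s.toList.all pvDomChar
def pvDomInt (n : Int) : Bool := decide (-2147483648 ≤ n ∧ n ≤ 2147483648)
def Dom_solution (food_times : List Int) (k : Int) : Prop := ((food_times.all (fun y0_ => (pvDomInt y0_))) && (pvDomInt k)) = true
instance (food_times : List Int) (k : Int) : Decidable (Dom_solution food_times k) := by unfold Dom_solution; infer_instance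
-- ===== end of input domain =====

-- B replaces A's repeated subtract-the-minimum rescan loop by one pass over the sorted distinct
-- values with precomputed counts (objective: faster).


-- ===== PORT A =====

-- measure for A's while-loop: one round with a negative entry makes all entries nonnegative,
-- and a round on a nonnegative list zeroes out all minimal nonzero entries
def solMeasure (ft : List Int) : Nat :=
  (if ft.any (fun x => decide (x < 0)) then ft.length + 1 else 0) +
    ft.countP (fun x => decide (x ≠ 0))

theorem countP_lt_of_mem {l : List Int} {p q : Int → Bool}
    (hsub : ∀ x ∈ l, p x = true → q x = true) {a : Int} (ha : a ∈ l)
    (hqa : q a = true) (hpa : p a = false) : l.countP p < l.countP q := by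
  induction l with
  | nil => cases ha
  | cons x t ih =>
    rcases List.mem_cons.mp ha with rfl | hat
    · have hle : t.countP p ≤ t.countP q :=
        List.countP_mono_left (fun x hx => hsub x (List.mem_cons_of_mem _ hx))
      simp [hpa, hqa]
      omega
    · have hlt := ih (fun x hx => hsub x (List.mem_cons_of_mem _ hx)) hat
      by_cases hpx : p x = true
      · have hqx := hsub x List.mem_cons_self hpx
        simp [hpx, hqx]; omega
      · simp only [Bool.not_eq_true] at hpx
        by_cases hqx : q x = true
        · simp [hpx, hqx]; omega
        · simp only [Bool.not_eq_true] at hqx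
          simp [hpx, hqx]; omega

theorem solMeasure_lt (ft : List Int) (m : Int)
    (hmem : m ∈ ft.filter (fun x => decide (x ≠ 0))) :
    solMeasure (ft.map (fun x => (x - m) * (if 0 ≤ x - m then 1 else 0))) < solMeasure ft := by
  have hnonneg : ∀ z ∈ ft.map (fun x => (x - m) * (if 0 ≤ x - m then 1 else 0)), 0 ≤ z := by
    intro z hz
    rcases List.mem_map.mp hz with ⟨x, _, rfl⟩
    by_cases h : 0 ≤ x - m
    · rw [if_pos h]; omega
    · rw [if_neg h]; omega
  have hflag : (ft.map (fun x => (x - m) * (if 0 ≤ x - m then 1 else 0))).any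
      (fun x => decide (x < 0)) = false := by
    rw [List.any_eq_false]; intro z hz; simpa using not_lt.mpr (hnonneg z hz)
  rcases List.mem_filter.mp hmem with ⟨hmft, hmne⟩
  have hmne' : m ≠ 0 := by simpa using hmne
  have hcle : (ft.map (fun x => (x - m) * (if 0 ≤ x - m then 1 else 0))).countP
      (fun x => decide (x ≠ 0)) ≤ ft.length := by
    simpa using List.countP_le_length ..
  by_cases hneg : ft.any (fun x => decide (x < 0)) = true
  · simp only [solMeasure, hneg, if_true, hflag, Bool.false_eq_true, if_false]
    omega
  · -- no negative entry: the minimal nonzero value m is positive and gets zeroed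
    have hnn : ∀ x ∈ ft, 0 ≤ x := by
      intro x hx
      by_contra hlt
      exact hneg (List.any_eq_true.mpr ⟨x, hx, by simpa using hlt⟩)
    have hmpos : 0 < m := lt_of_le_of_ne (hnn m hmft) (Ne.symm hmne')
    have hcnt : (ft.map (fun x => (x - m) * (if 0 ≤ x - m then 1 else 0))).countP
        (fun x => decide (x ≠ 0)) < ft.countP (fun x => decide (x ≠ 0)) := by
      rw [List.countP_map]
      refine countP_lt_of_mem (fun x hx hpx => ?_) hmft (by simpa using hmne') ?_
      · simp only [Function.comp] at hpx
        simp at hpx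
        simp only [decide_eq_true_eq]
        omega
      · simp [Function.comp]
    simp only [solMeasure]
    rw [if_neg hneg]
    simp only [hflag, Bool.false_eq_true, if_false]
    omega

-- A's "i not in set([0])" test
def notZero (i : Int) : Bool := !(PySem.Set.contains (PySem.Set.ofList [(0 : Int)]) i)

-- A's update lambda: (x - min_val) * ((x - min_val) >= 0)
def clampSub (m x : Int) : Int := (x - m) * (if 0 ≤ x - m then 1 else 0)

theorem notZero_eq : notZero = (fun x : Int => decide (x ≠ 0)) := by
  funext i; simp [notZero, PySem.Set.mem_ofList]

def solutionLoop (ft : List Int) (k : Int) : List Int × Int × Int :=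
  if k > 0 then
    let mvl := ft.filter notZero
    if mvl = [] then (ft, k, -1)
    else
      match hmv : PySem.List.min? mvl (fun x => x) with
      | none => (ft, k, 0)   -- unreachable: mvl ≠ [] (Python's min never sees an empty list here)
      | some m =>
        if k - mvl.length * m < 0 then (ft, k, 0)
        else solutionLoop (ft.map (clampSub m)) (k - mvl.length * m)
  else (ft, k, 0)
termination_by solMeasure ft
decreasing_by
  simp only [List.map_subtype, List.unattach_attach] at *
  have hmvl : mvl = ft.filter (fun x : Int => decide (x ≠ 0)) := by
    simp only [mvl, List.unattach_filter, List.unattach_attach, notZero_eq]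
  have hmem := PySem.List.min?_mem hmv
  rw [hmvl] at hmem
  exact solMeasure_lt ft m hmem

def solutionScan (ft : List Int) (k : Int) (comp idx : Int) : Int :=
  match ft with
  | [] => comp
  | x :: rest =>
    let comp := comp + 1
    let idx := if x > 0 then idx + 1 else idx
    if idx = k + 1 then comp else solutionScan rest k comp idx

-- after the loop: run the final scan, then override with -1 if the loop flagged it
def solutionAfter (r : List Int × Int × Int) : Int :=
  if r.2.2 = -1 then -1 else solutionScan r.1 r.2.1 0 0

def solution (food_times : List Int) (k : Int) : Int :=
  solutionAfter (solutionLoop food_times k)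

-- ===== PORT B =====

def altScan (ft : List Int) (base k comp idx : Int) : Int :=
  match ft with
  | [] => comp
  | x :: rest =>
    let comp := comp + 1
    let idx := if x > base then idx + 1 else idx
    if idx = k + 1 then comp else altScan rest base k comp idx

def altLevels (vals : List Int) (cnt : PySem.Dict Int Int) (total k base rem done : Int) :
    Int × Int × Bool :=
  match vals with
  | [] => (k, base, false)
  | v :: rest =>
    if k ≤ 0 then (k, base, false)
    else
      let cost := (v - base) * rem
      if k - cost < 0 then (k, base, true)
      else
        let done := done + cnt.getD v 0
        altLevels rest cnt total (k - cost) v (total - done) done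

-- after the level loop: -1 if time is left and no level broke, else the final scan
def altAfter (ft : List Int) (r : Int × Int × Bool) : Int :=
  if r.1 > 0 ∧ r.2.2 = false then -1 else altScan ft r.2.1 r.1 0 0

def solution_alt (food_times : List Int) (k : Int) : Int :=
  let cnt := food_times.foldl (fun d x => d.insert x (d.getD x 0 + 1)) PySem.Dict.empty
  let total : Int := (food_times.length : Int)
  altAfter food_times
    (altLevels (PySem.List.sorted (PySem.Set.ofList food_times) (fun x => x) false)
      cnt total k 0 (total - cnt.getD 0 0) 0)

-- ===== PRECONDITION & SPEC =====
def Spec_solution (food_times : List Int) (k : Int) (out : Int) : Prop := out = solution_alt food_times k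
instance (food_times : List Int) (k : Int) (out : Int) : Decidable (Spec_solution food_times k out) := by unfold Spec_solution; infer_instance

-- ===== CLAIM (what is proved, stated in full; the proofs are below) =====
def Claim_equal_solution : Prop := ∀ (food_times : List Int) (k : Int), Dom_solution food_times k → Spec_solution food_times k (solution food_times k)

-- ===== LEMMAS AND PROOFS =====

theorem scan_zero (ft : List Int) (k c i : Int) :
    solutionScan ft k c i = altScan ft 0 k c i := by
  induction ft generalizing c i with
  | nil => rfl
  | cons x t ihx => simp only [solutionScan, altScan]; split_ifs <;> simp [ihx]

-- pure shift of the final scan (every entry and the base shifted by -v)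
theorem altScan_shift (ft : List Int) (v b k c i : Int) :
    altScan (ft.map (fun x => x - v)) (b - v) k c i = altScan ft b k c i := by
  induction ft generalizing c i with
  | nil => rfl
  | cons x t ihx =>
    have hiff : (x - v > b - v) ↔ (x > b) := by omega
    simp only [List.map_cons, altScan]
    by_cases hx : x > b
    · rw [if_pos (hiff.mpr hx), if_pos hx]
      split_ifs <;> simp [ihx]
    · rw [if_neg (fun h => hx (hiff.mp h)), if_neg hx]
      split_ifs <;> simp [ihx]

theorem altScan_clamp (ft : List Int) (v b k c i : Int) (hb : 0 ≤ b) :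
    altScan (ft.map (clampSub v)) b k c i = altScan ft (b + v) k c i := by
  induction ft generalizing c i with
  | nil => rfl
  | cons x t ihx =>
    have hiff : (clampSub v x > b) ↔ (x > b + v) := by
      unfold clampSub
      by_cases h : 0 ≤ x - v
      · rw [if_pos h]; omega
      · rw [if_neg h]; omega
    simp only [List.map_cons, altScan]
    by_cases hx : x > b + v
    · rw [if_pos (hiff.mpr hx), if_pos hx]
      split_ifs <;> simp [ihx]
    · rw [if_neg (fun h => hx (hiff.mp h)), if_neg hx]
      split_ifs <;> simp [ihx]

theorem altLevels_shift (vals : List Int) (v : Int) (cnt cnt' : PySem.Dict Int Int)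
    (h : ∀ w ∈ vals, cnt'.getD (w - v) 0 = cnt.getD w 0) :
    ∀ (total k b rem done : Int),
      altLevels (vals.map (fun w => w - v)) cnt' total k (b - v) rem done =
      ((altLevels vals cnt total k b rem done).1,
        (altLevels vals cnt total k b rem done).2.1 - v,
        (altLevels vals cnt total k b rem done).2.2) := by
  induction vals with
  | nil => intro total k b rem done; simp [altLevels]
  | cons w rest ihx =>
    intro total k b rem done
    simp only [List.map_cons, altLevels]
    by_cases hk : k ≤ 0
    · simp [hk]
    · simp only [hk, if_false]
      have hcost : (w - v - (b - v)) * rem = (w - b) * rem := by ring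
      rw [hcost]
      by_cases hbr : k - (w - b) * rem < 0
      · simp [hbr]
      · simp only [hbr, if_false]
        rw [h w List.mem_cons_self]
        exact ihx (fun u hu => h u (List.mem_cons_of_mem _ hu)) total (k - (w - b) * rem) w
          (total - (done + cnt.getD w 0)) (done + cnt.getD w 0)

theorem altLevels_base (vals : List Int) (cnt : PySem.Dict Int Int) (total k b rem done : Int) :
    (altLevels vals cnt total k b rem done).2.1 = b ∨
      (altLevels vals cnt total k b rem done).2.1 ∈ vals := by
  induction vals generalizing k b rem done with
  | nil => left; rfl
  | cons w rest ihx =>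
    simp only [altLevels]
    by_cases hk : k ≤ 0
    · simp [hk]
    · simp only [hk, if_false]
      by_cases hbr : k - (w - b) * rem < 0
      · simp [hbr]
      · simp only [hbr, if_false]
        rcases ihx (k - (w - b) * rem) w (total - (done + cnt.getD w 0))
            (done + cnt.getD w 0) with h | h
        · right; simp [h]
        · right; exact List.mem_cons_of_mem _ h

-- Python's min of a list is the head of the sorted distinct values
theorem min?_of_sorted (l : List Int) (v : Int) (rest : List Int)
    (hs : PySem.List.sorted (PySem.Set.ofList l) (fun x => x) false = v :: rest) :
    PySem.List.min? l (fun x => x) = some v := by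
  have hvl : v ∈ l := by
    have : v ∈ PySem.List.sorted (PySem.Set.ofList l) (fun x => x) false := by
      rw [hs]; exact List.mem_cons_self
    rw [PySem.List.mem_sorted] at this
    rwa [PySem.Set.mem_ofList] at this
  have hne : l ≠ [] := fun h => by subst h; cases hvl
  obtain ⟨m, hm⟩ : ∃ m, PySem.List.min? l (fun x => x) = some m := by
    cases h : PySem.List.min? l (fun x => x) with
    | none => exact absurd ((PySem.List.min?_eq_none_iff l (fun x => x)).mp h) hne
    | some m => exact ⟨m, rfl⟩
  have hmem := PySem.List.min?_mem hm
  have hmin := PySem.List.min?_isMin hm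
  have hvm : v ≤ m := by
    have := PySem.List.key_head_sorted_le _ _ hs m ((PySem.Set.mem_ofList _ _).mpr hmem)
    simpa using this
  have hmv : m ≤ v := hmin v hvl
  rw [hm, le_antisymm hmv hvm]

-- nonzero entries of the updated list are the old entries above v, shifted down by v
theorem filter_clamp (ft : List Int) (v : Int) :
    (ft.map (clampSub v)).filter (fun x => decide (x ≠ 0)) =
      (ft.filter (fun x => decide (v < x))).map (fun x => x - v) := by
  induction ft with
  | nil => rfl
  | cons x t ihx =>
    by_cases hx : v < x
    · have h1 : clampSub v x = x - v := by unfold clampSub; rw [if_pos (by omega)]; ring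
      simp [h1, hx, show x - v ≠ 0 from by omega]
      simpa using ihx
    · have h1 : clampSub v x = 0 := by
        unfold clampSub; by_cases h : 0 ≤ x - v
        · rw [if_pos h]; have hxv : x = v := by omega
          rw [hxv]; ring
        · rw [if_neg h]; ring
      simp [h1, hx]
      simpa using ihx

theorem count_clamp (ft : List Int) (v w : Int) (hw : v < w) :
    List.count (w - v) ((ft.map (clampSub v)).filter (fun x => decide (x ≠ 0))) =
      List.count w ft := by
  rw [filter_clamp]
  rw [List.count_map_of_injective _ _ (fun a b h => by simpa using h : Function.Injective (fun x : Int => x - v))]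
  exact List.count_filter (by simpa using hw)

-- zeros of the clamped list come from the entries at or below the minimum nonzero value v
theorem count0_clamp (ft : List Int) (v : Int) (hv : 0 < v)
    (hmin : ∀ x ∈ ft, x ≠ 0 → v ≤ x) :
    List.count 0 (ft.map (clampSub v)) = List.count 0 ft + List.count v ft := by
  induction ft with
  | nil => rfl
  | cons x t ihx =>
    have ht := ihx (fun y hy => hmin y (List.mem_cons_of_mem _ hy))
    have hx := hmin x List.mem_cons_self
    simp only [List.map_cons, List.count_cons]
    rw [ht]
    by_cases h0 : x = 0
    · subst h0
      have hc : clampSub v (0 : Int) = 0 := by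
        unfold clampSub; rw [if_neg (by omega)]; ring
      simp [hc, show ¬ ((0 : Int) = v) from by omega]
      omega
    · have hvx := hx h0
      by_cases hxv : x = v
      · subst hxv
        have hc : clampSub x x = 0 := by unfold clampSub; rw [if_pos (by omega)]; ring
        simp [hc, h0]
        omega
      · have hgt : v < x := lt_of_le_of_ne hvx (Ne.symm hxv)
        have hc : clampSub v x = x - v := by unfold clampSub; rw [if_pos (by omega)]; ring
        simp [hc, show ¬ (x - v = 0) from by omega, h0, hxv]

theorem count_shift (ft : List Int) (v w : Int) :
    List.count (w - v) (ft.map (fun x => x - v)) = List.count w ft := by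
  rw [List.count_map_of_injective _ _
    (fun a b h => by simpa using h : Function.Injective (fun x : Int => x - v))]

-- one round of A's loop strictly decreases the number of nonzero entries (nonnegative list)
theorem countP_clamp_lt (ft : List Int) (m : Int) (hnn : ∀ x ∈ ft, 0 ≤ x)
    (hmem : m ∈ ft.filter (fun x => decide (x ≠ 0))) :
    (ft.map (clampSub m)).countP (fun x => decide (x ≠ 0)) <
      ft.countP (fun x => decide (x ≠ 0)) := by
  rcases List.mem_filter.mp hmem with ⟨hmft, hmne⟩
  have hmne' : m ≠ 0 := by simpa using hmne
  have hmpos : 0 < m := lt_of_le_of_ne (hnn m hmft) (Ne.symm hmne')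
  rw [List.countP_map]
  refine countP_lt_of_mem (fun x hx hpx => ?_) hmft (by simpa using hmne') ?_
  · simp only [Function.comp, clampSub] at hpx
    simp at hpx
    simp only [decide_eq_true_eq]
    omega
  · simp [Function.comp, clampSub]

-- the sorted distinct values of a shifted list are the shifted sorted distinct values
theorem sorted_set_shift (l : List Int) (v : Int) :
    PySem.List.sorted (PySem.Set.ofList (l.map (fun x => x - v))) (fun x => x) false =
      (PySem.List.sorted (PySem.Set.ofList l) (fun x => x) false).map (fun x => x - v) := by
  have hinj : Function.Injective (fun x : Int => x - v) := fun a b h => by simpa using h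
  refine PySem.List.sorted_eq_of_perm_of_pairwise_lt _ _ _ ?_ ?_
  · rw [List.perm_ext_iff_of_nodup]
    · intro a
      rw [PySem.Set.mem_ofList]
      constructor
      · intro ha
        rcases List.mem_map.mp ha with ⟨w, hw, rfl⟩
        have hw' : w ∈ l := (PySem.Set.mem_ofList _ _).mp ((PySem.List.mem_sorted _ _ _ _).mp hw)
        exact List.mem_map.mpr ⟨w, hw', rfl⟩
      · intro ha
        rcases List.mem_map.mp ha with ⟨w, hw, rfl⟩
        have hw' : w ∈ PySem.List.sorted (PySem.Set.ofList l) (fun x => x) false :=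
          (PySem.List.mem_sorted _ _ _ _).mpr ((PySem.Set.mem_ofList _ _).mpr hw)
        exact List.mem_map.mpr ⟨w, hw', rfl⟩
    · exact List.Nodup.map hinj
        ((PySem.List.sorted_ofList_pairwise_lt _).imp (fun h => by omega))
    · exact PySem.Set.nodup_ofList _
  · exact (PySem.List.sorted_ofList_pairwise_lt l).map _ (fun a b h => by omega)

theorem solutionLoop_nonpos (ft : List Int) (k : Int) (hk : ¬ k > 0) :
    solutionLoop ft k = (ft, k, 0) := by
  rw [solutionLoop]; simp [hk]

theorem solutionLoop_empty (ft : List Int) (k : Int) (hk : k > 0)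
    (h : ft.filter notZero = []) : solutionLoop ft k = (ft, k, -1) := by
  rw [solutionLoop]; simp [hk, h]

theorem solutionLoop_step (ft : List Int) (k v : Int) (hk : k > 0)
    (hne : ft.filter notZero ≠ [])
    (hmv : PySem.List.min? (ft.filter notZero) (fun x => x) = some v) :
    solutionLoop ft k =
      if k - (ft.filter notZero).length * v < 0 then (ft, k, 0)
      else solutionLoop (ft.map (clampSub v)) (k - (ft.filter notZero).length * v) := by
  rw [solutionLoop]
  simp only [if_pos hk]
  rw [if_neg hne]
  split
  · next heq => rw [hmv] at heq; cases heq
  · next m heq => rw [hmv] at heq; cases heq; rfl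

theorem altLevels_nonpos (vals : List Int) (cnt : PySem.Dict Int Int) (total k b rem done : Int)
    (hk : ¬ k > 0) : altLevels vals cnt total k b rem done = (k, b, false) := by
  cases vals with
  | nil => rfl
  | cons v rest => simp [altLevels, show k ≤ 0 from by omega]

theorem ofList_ne_nil {xs : List Int} (h : xs ≠ []) : PySem.Set.ofList xs ≠ [] := by
  intro hofl
  cases xs with
  | nil => exact h rfl
  | cons a t =>
    have : a ∈ PySem.Set.ofList (a :: t) := (PySem.Set.mem_ofList _ _).mpr List.mem_cons_self
    rw [hofl] at this
    cases this

-- B with the counter spelled out and the level list abstracted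
def altCoreW (ft levels : List Int) (k : Int) : Int :=
  altAfter ft
    (altLevels levels (PySem.Dict.counter ft) (ft.length : Int) k 0
      ((ft.length : Int) - (List.count 0 ft : Int)) 0)

theorem solution_alt_eq_coreW (ft : List Int) (k : Int) :
    solution_alt ft k =
      altCoreW ft (PySem.List.sorted (PySem.Set.ofList ft) (fun x => x) false) k := by
  simp only [solution_alt, altCoreW, PySem.Dict.foldl_insert_getD_add_one_eq_counter,
    PySem.Dict.getD_counter]

-- counting: zeros plus nonzeros make up the whole list
theorem len_nz (ft : List Int) :
    List.count 0 ft + (ft.filter (fun x => decide (x ≠ 0))).length = ft.length := by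
  induction ft with
  | nil => rfl
  | cons x t ihx =>
    simp only [List.count_cons, List.filter_cons]
    split_ifs with h1 h2 <;> simp_all <;> omega

-- a list of zeros has [0] (or []) as its sorted distinct values
theorem sorted_set_allzero (ft : List Int) (hft : ft ≠ []) (h : ∀ x ∈ ft, x = 0) :
    PySem.List.sorted (PySem.Set.ofList ft) (fun x => x) false = [0] := by
  refine PySem.List.sorted_eq_of_perm_of_pairwise_lt _ _ _ ?_ (by simp)
  rw [List.perm_ext_iff_of_nodup (by simp) (PySem.Set.nodup_ofList _)]
  intro a
  rw [PySem.Set.mem_ofList]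
  constructor
  · intro ha
    simp only [List.mem_singleton] at ha
    subst ha
    cases ft with
    | nil => exact absurd rfl hft
    | cons x t =>
      have := h x List.mem_cons_self
      subst this; exact List.mem_cons_self
  · intro ha
    simp [h a ha]

-- sorted distinct values of a nonnegative list containing 0: 0 followed by the nonzero ones
theorem sorted_set_with0 (ft : List Int) (hnn : ∀ x ∈ ft, 0 ≤ x) (h0 : 0 ∈ ft) :
    PySem.List.sorted (PySem.Set.ofList ft) (fun x => x) false =
      0 :: PySem.List.sorted (PySem.Set.ofList (ft.filter (fun x => decide (x ≠ 0))))
        (fun x => x) false := by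
  have hpw := PySem.List.sorted_ofList_pairwise_lt (ft.filter (fun x => decide (x ≠ 0)))
  have hmem : ∀ a, a ∈ PySem.List.sorted (PySem.Set.ofList (ft.filter (fun x => decide (x ≠ 0))))
      (fun x => x) false ↔ (a ∈ ft ∧ a ≠ 0) := by
    intro a
    rw [PySem.List.mem_sorted, PySem.Set.mem_ofList, List.mem_filter]
    simp
  refine PySem.List.sorted_eq_of_perm_of_pairwise_lt _ _ _ ?_ ?_
  · rw [List.perm_ext_iff_of_nodup ?_ (PySem.Set.nodup_ofList _)]
    · intro a
      rw [PySem.Set.mem_ofList, List.mem_cons, hmem]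
      constructor
      · rintro (rfl | ⟨ha, _⟩)
        · exact h0
        · exact ha
      · intro ha
        by_cases h : a = 0
        · exact Or.inl h
        · exact Or.inr ⟨ha, h⟩
    · refine List.nodup_cons.mpr ⟨fun h => ?_, hpw.imp (fun h => by omega)⟩
      exact absurd ((hmem 0).mp h).2 (by simp)
  · refine List.pairwise_cons.mpr ⟨fun a ha => ?_, hpw⟩
    rcases (hmem a).mp ha with ⟨haft, hane⟩
    have := hnn a haft
    omega

-- the tail of the sorted distinct values holds exactly the entries above the head
theorem sorted_set_tail (l : List Int) (v : Int) (rest : List Int)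
    (hs : PySem.List.sorted (PySem.Set.ofList l) (fun x => x) false = v :: rest) :
    ∀ w, w ∈ rest ↔ (w ∈ l ∧ v < w) := by
  have hpw : (v :: rest).Pairwise (fun a b : Int => a < b) := by
    rw [← hs]; exact PySem.List.sorted_ofList_pairwise_lt _
  intro w
  constructor
  · intro hw
    have hwl : w ∈ PySem.List.sorted (PySem.Set.ofList l) (fun x => x) false := by
      rw [hs]; exact List.mem_cons_of_mem _ hw
    rw [PySem.List.mem_sorted, PySem.Set.mem_ofList] at hwl
    exact ⟨hwl, (List.pairwise_cons.mp hpw).1 w hw⟩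
  · rintro ⟨h1, h2⟩
    have : w ∈ (v :: rest) := by
      rw [← hs, PySem.List.mem_sorted, PySem.Set.mem_ofList]
      exact h1
    rcases List.mem_cons.mp this with rfl | h
    · omega
    · exact h

-- no zeros: filtering out the zeros changes nothing
theorem sorted_set_no0 (ft : List Int) (h0 : (0:Int) ∉ ft) :
    PySem.List.sorted (PySem.Set.ofList ft) (fun x => x) false =
      PySem.List.sorted (PySem.Set.ofList (ft.filter (fun x => decide (x ≠ 0))))
        (fun x => x) false := by
  rw [List.filter_eq_self.mpr]
  intro a ha
  simp only [decide_eq_true_eq]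
  exact fun h => h0 (h ▸ ha)

-- sorted distinct values of the clamped list: 0, then the higher values shifted down by v
theorem sorted_set_clamp (ft : List Int) (v : Int) (rest : List Int)
    (hv : 0 < v) (hvft : v ∈ ft)
    (hs : PySem.List.sorted (PySem.Set.ofList (ft.filter (fun x => decide (x ≠ 0))))
        (fun x => x) false = v :: rest) :
    PySem.List.sorted (PySem.Set.ofList (ft.map (clampSub v))) (fun x => x) false =
      0 :: rest.map (fun x => x - v) := by
  have hc0 : clampSub v v = 0 := by unfold clampSub; rw [if_pos (by omega)]; ring
  have h0' : (0:Int) ∈ ft.map (clampSub v) := List.mem_map.mpr ⟨v, hvft, hc0⟩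
  have hnn' : ∀ x ∈ ft.map (clampSub v), 0 ≤ x := by
    intro z hz
    rcases List.mem_map.mp hz with ⟨x, _, rfl⟩
    unfold clampSub
    by_cases h : 0 ≤ x - v
    · rw [if_pos h]; omega
    · rw [if_neg h]; omega
  rw [sorted_set_with0 _ hnn' h0']
  congr 1
  have hfc := filter_clamp ft v
  rw [hfc, sorted_set_shift]
  congr 1
  have htail := sorted_set_tail _ _ _ hs
  have hpw : (v :: rest).Pairwise (fun a b : Int => a < b) := by
    rw [← hs]; exact PySem.List.sorted_ofList_pairwise_lt _
  refine PySem.List.sorted_eq_of_perm_of_pairwise_lt _ _ _ ?_ ((List.pairwise_cons.mp hpw).2)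
  rw [List.perm_ext_iff_of_nodup
      (hpw.sublist (List.sublist_cons_self _ _) |>.imp (fun h => by omega))
      (PySem.Set.nodup_ofList _)]
  intro a
  rw [PySem.Set.mem_ofList, List.mem_filter, htail a]
  simp
  intro h1 h2
  omega

-- crossing the 0 level costs nothing (base stays 0, the zeros are marked done)
theorem altLevels_zero (rest : List Int) (cnt : PySem.Dict Int Int)
    (total k rem done : Int) (hk : k > 0) :
    altLevels (0 :: rest) cnt total k 0 rem done =
      altLevels rest cnt total k 0 (total - (done + cnt.getD 0 0)) (done + cnt.getD 0 0) := by
  simp only [altLevels]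
  rw [if_neg (by omega)]
  rw [if_neg (by
    have : ((0:Int) - 0) * rem = 0 := by ring
    rw [this]; omega)]
  have h1 : k - ((0:Int) - 0) * rem = k := by ring
  rw [h1]

-- k already spent: both sides go straight to the final scan from base 0
theorem eq_of_nonpos (ft : List Int) (k : Int) (hk : ¬ k > 0) :
    solution ft k = solution_alt ft k := by
  unfold solution
  rw [solutionLoop_nonpos ft k hk, solution_alt_eq_coreW]
  unfold altCoreW
  rw [altLevels_nonpos _ _ _ _ _ _ _ hk]
  unfold solutionAfter altAfter
  dsimp only
  rw [if_neg (by norm_num : ¬ (0:Int) = -1), if_neg (by simp [hk])]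
  exact scan_zero ft k 0 0

-- nothing left to eat: both sides answer -1
theorem eq_allzero (ft : List Int) (k : Int) (hk : k > 0)
    (h : ft.filter (fun x => decide (x ≠ 0)) = []) :
    solution ft k = solution_alt ft k := by
  have h' : ft.filter notZero = [] := by rw [notZero_eq]; exact h
  unfold solution
  rw [solutionLoop_empty ft k hk h', solution_alt_eq_coreW]
  unfold altCoreW
  have hall : ∀ x ∈ ft, x = 0 := by
    intro x hx
    by_contra hne
    have : x ∈ ft.filter (fun x => decide (x ≠ 0)) :=
      List.mem_filter.mpr ⟨hx, by simpa using hne⟩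
    rw [h] at this
    cases this
  have hres : altLevels (PySem.List.sorted (PySem.Set.ofList ft) (fun x => x) false)
      (PySem.Dict.counter ft) (ft.length : Int) k 0
      ((ft.length : Int) - (List.count 0 ft : Int)) 0 = (k, 0, false) := by
    cases hft : ft with
    | nil => subst hft; rfl
    | cons a t =>
      rw [← hft, sorted_set_allzero ft (by rw [hft]; simp) hall]
      rw [altLevels_zero _ _ _ _ _ _ hk]
      rfl
  rw [hres]
  unfold solutionAfter altAfter
  dsimp only
  rw [if_pos rfl, if_pos (by simp [hk])]

theorem main_nonneg : ∀ (n : Nat) (ft : List Int) (k : Int),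
    ft.countP (fun x => decide (x ≠ 0)) = n → (∀ x ∈ ft, 0 ≤ x) →
    solution ft k = solution_alt ft k := by
  intro n
  induction n using Nat.strong_induction_on with
  | _ n ih =>
  intro ft k hc hnn
  by_cases hk : k > 0
  case neg => exact eq_of_nonpos ft k hk
  case pos =>
  by_cases hemp : ft.filter (fun x => decide (x ≠ 0)) = []
  · exact eq_allzero ft k hk hemp
  · obtain ⟨v, rest, hs⟩ : ∃ v rest,
        PySem.List.sorted (PySem.Set.ofList (ft.filter (fun x => decide (x ≠ 0))))
          (fun x => x) false = v :: rest := by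
      cases h : PySem.List.sorted (PySem.Set.ofList (ft.filter (fun x => decide (x ≠ 0))))
          (fun x => x) false with
      | nil => exact absurd ((PySem.List.sorted_eq_nil_iff _ _ _).mp h) (ofList_ne_nil hemp)
      | cons v rest => exact ⟨v, rest, rfl⟩
    have hminq : PySem.List.min? (ft.filter (fun x => decide (x ≠ 0))) (fun x => x) = some v :=
      min?_of_sorted _ v rest hs
    have hvmem : v ∈ ft.filter (fun x => decide (x ≠ 0)) := PySem.List.min?_mem hminq
    have hvft : v ∈ ft := (List.mem_filter.mp hvmem).1
    have hvpos : 0 < v := by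
      have h2 := (List.mem_filter.mp hvmem).2
      have := hnn v hvft
      simp at h2
      omega
    have hminle : ∀ y ∈ ft.filter (fun x => decide (x ≠ 0)), v ≤ y := by
      have := PySem.List.min?_isMin hminq
      simpa using this
    have hminft : ∀ x ∈ ft, x ≠ 0 → v ≤ x := fun x hx hne =>
      hminle x (List.mem_filter.mpr ⟨hx, by simpa using hne⟩)
    have hnzeq : ft.filter notZero = ft.filter (fun x => decide (x ≠ 0)) := by rw [notZero_eq]
    have hstep := solutionLoop_step ft k v hk (by rw [hnzeq]; exact hemp)
      (by rw [hnzeq]; exact hminq)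
    rw [hnzeq] at hstep
    have hlenI : (List.count 0 ft : Int) + ((ft.filter (fun x => decide (x ≠ 0))).length : Int)
        = (ft.length : Int) := by exact_mod_cast len_nz ft
    have hrem : (ft.length : Int) - (List.count 0 ft : Int)
        = ((ft.filter (fun x => decide (x ≠ 0))).length : Int) := by omega
    have hlevels : altLevels (PySem.List.sorted (PySem.Set.ofList ft) (fun x => x) false)
        (PySem.Dict.counter ft) (ft.length : Int) k 0
        ((ft.length : Int) - (List.count 0 ft : Int)) 0 =
        altLevels (v :: rest) (PySem.Dict.counter ft) (ft.length : Int) k 0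
          ((ft.length : Int) - (List.count 0 ft : Int)) (List.count 0 ft : Int) := by
      by_cases h0 : (0:Int) ∈ ft
      · rw [sorted_set_with0 ft hnn h0, hs, altLevels_zero _ _ _ _ _ _ hk,
          PySem.Dict.getD_counter, zero_add]
      · rw [sorted_set_no0 ft h0, hs]
        have hcz : List.count 0 ft = 0 := by
          rw [List.count_eq_zero]; exact h0
        rw [hcz]
        norm_num
    by_cases hbr : k - ((ft.filter (fun x => decide (x ≠ 0))).length : Int) * v < 0
    · unfold solution
      rw [hstep, if_pos hbr, solution_alt_eq_coreW]
      unfold altCoreW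
      rw [hlevels]
      have hT : altLevels (v :: rest) (PySem.Dict.counter ft) (ft.length : Int) k 0
          ((ft.length : Int) - (List.count 0 ft : Int)) (List.count 0 ft : Int)
          = (k, 0, true) := by
        simp only [altLevels]
        rw [if_neg (by omega)]
        rw [if_pos (by
          rw [hrem]
          have he : (v - 0) * ((ft.filter (fun x => decide (x ≠ 0))).length : Int) =
            ((ft.filter (fun x => decide (x ≠ 0))).length : Int) * v := by ring
          rw [he]
          omega)]
      rw [hT]
      unfold solutionAfter altAfter
      dsimp only
      rw [if_neg (by norm_num : ¬ (0:Int) = -1), if_neg (by simp)]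
      exact scan_zero ft k 0 0
    · have hstep' : solution ft k =
          solution (ft.map (clampSub v))
            (k - ((ft.filter (fun x => decide (x ≠ 0))).length : Int) * v) := by
        unfold solution
        rw [hstep, if_neg hbr]
      have hnn' : ∀ x ∈ ft.map (clampSub v), 0 ≤ x := by
        intro z hz
        rcases List.mem_map.mp hz with ⟨x, _, rfl⟩
        unfold clampSub
        by_cases h : 0 ≤ x - v
        · rw [if_pos h]; omega
        · rw [if_neg h]; omega
      have hlt : (ft.map (clampSub v)).countP (fun x => decide (x ≠ 0)) < n :=
        hc ▸ countP_clamp_lt ft v hnn hvmem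
      rw [hstep', ih _ hlt _ _ rfl hnn']
      -- both sides are now B; relate B on the clamped list to B on the original
      rw [solution_alt_eq_coreW, solution_alt_eq_coreW]
      unfold altCoreW
      rw [hlevels, sorted_set_clamp ft v rest hvpos hvft hs]
      have htot' : ((ft.map (clampSub v)).length : Int) = (ft.length : Int) := by
        rw [List.length_map]
      have hc0' : (List.count 0 (ft.map (clampSub v)) : Int) =
          (List.count 0 ft : Int) + (List.count v ft : Int) := by
        exact_mod_cast count0_clamp ft v hvpos hminft
      rw [htot', hc0']
      have htail := sorted_set_tail _ _ _ hs
      have hcnt : ∀ w ∈ rest, (PySem.Dict.counter (ft.map (clampSub v))).getD (w - v) 0 =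
          (PySem.Dict.counter ft).getD w 0 := by
        intro w hw
        rcases (htail w).mp hw with ⟨hwf, hwv⟩
        rw [PySem.Dict.getD_counter, PySem.Dict.getD_counter]
        have h1 : List.count (w - v) (ft.map (clampSub v)) =
            List.count (w - v) ((ft.map (clampSub v)).filter (fun x => decide (x ≠ 0))) := by
          rw [List.count_filter (by simp; omega)]
        rw [h1, count_clamp ft v w hwv]
      have hA : altLevels (v :: rest) (PySem.Dict.counter ft) (ft.length : Int) k 0
          ((ft.length : Int) - (List.count 0 ft : Int)) (List.count 0 ft : Int) =
          altLevels rest (PySem.Dict.counter ft) (ft.length : Int)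
            (k - ((ft.filter (fun x => decide (x ≠ 0))).length : Int) * v) v
            ((ft.length : Int) - ((List.count 0 ft : Int) + (List.count v ft : Int)))
            ((List.count 0 ft : Int) + (List.count v ft : Int)) := by
        simp only [altLevels]
        rw [if_neg (by omega)]
        rw [if_neg (by
          rw [hrem]
          have he : (v - 0) * ((ft.filter (fun x => decide (x ≠ 0))).length : Int) =
            ((ft.filter (fun x => decide (x ≠ 0))).length : Int) * v := by ring
          rw [he]
          omega)]
        have e1 : k - (v - 0) * ((ft.length : Int) - (List.count 0 ft : Int)) =
            k - ((ft.filter (fun x => decide (x ≠ 0))).length : Int) * v := by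
          rw [hrem]; ring
        have e2 : (List.count 0 ft : Int) + (PySem.Dict.counter ft).getD v 0 =
            (List.count 0 ft : Int) + (List.count v ft : Int) := by
          rw [PySem.Dict.getD_counter]
        rw [e1, e2]
      rw [hA]
      by_cases hk' : k - ((ft.filter (fun x => decide (x ≠ 0))).length : Int) * v > 0
      · rw [altLevels_zero _ _ _ _ _ _ hk', PySem.Dict.getD_counter, hc0', zero_add]
        have hshift := altLevels_shift rest v (PySem.Dict.counter ft)
          (PySem.Dict.counter (ft.map (clampSub v))) hcnt (ft.length : Int)
          (k - ((ft.filter (fun x => decide (x ≠ 0))).length : Int) * v) v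
          ((ft.length : Int) - ((List.count 0 ft : Int) + (List.count v ft : Int)))
          ((List.count 0 ft : Int) + (List.count v ft : Int))
        rw [show v - v = (0:Int) from by ring] at hshift
        rw [hshift]
        set R := altLevels rest (PySem.Dict.counter ft) (ft.length : Int)
          (k - ((ft.filter (fun x => decide (x ≠ 0))).length : Int) * v) v
          ((ft.length : Int) - ((List.count 0 ft : Int) + (List.count v ft : Int)))
          ((List.count 0 ft : Int) + (List.count v ft : Int)) with hRdef
        have hbase : v ≤ R.2.1 := by
          rcases altLevels_base rest (PySem.Dict.counter ft) (ft.length : Int)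
              (k - ((ft.filter (fun x => decide (x ≠ 0))).length : Int) * v) v
              ((ft.length : Int) - ((List.count 0 ft : Int) + (List.count v ft : Int)))
              ((List.count 0 ft : Int) + (List.count v ft : Int)) with h | h
          · rw [← hRdef] at h; omega
          · rw [← hRdef] at h
            rcases (htail _).mp h with ⟨_, hgt⟩
            omega
        unfold altAfter
        dsimp only
        by_cases hcond : R.1 > 0 ∧ R.2.2 = false
        · rw [if_pos hcond, if_pos hcond]
        · rw [if_neg hcond, if_neg hcond]
          rw [altScan_clamp ft v (R.2.1 - v) R.1 0 0 (by omega)]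
          rw [show R.2.1 - v + v = R.2.1 from by ring]
      · rw [altLevels_nonpos _ _ _ _ _ _ _ hk']
        rw [altLevels_nonpos _ _ _ _ _ _ _ hk']
        unfold altAfter
        dsimp only
        rw [if_neg (fun hcc => hk' hcc.1), if_neg (fun hcc => hk' hcc.1)]
        rw [altScan_clamp ft v 0 _ 0 0 (by omega), zero_add]

-- ===== VERDICT (by name: the statement is the Claim_ definition above) =====
theorem solution_spec : Claim_equal_solution := by
  unfold Claim_equal_solution
  intro ft k _hdom
  unfold Spec_solution
  by_cases hk : k > 0
  case neg => exact eq_of_nonpos ft k hk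
  case pos =>
  by_cases hemp : ft.filter (fun x => decide (x ≠ 0)) = []
  · exact eq_allzero ft k hk hemp
  · obtain ⟨m, hm⟩ : ∃ m,
        PySem.List.min? (ft.filter (fun x => decide (x ≠ 0))) (fun x => x) = some m := by
      cases h : PySem.List.min? (ft.filter (fun x => decide (x ≠ 0))) (fun x => x) with
      | none => exact absurd ((PySem.List.min?_eq_none_iff _ _).mp h) hemp
      | some m => exact ⟨m, rfl⟩
    have hmmem := PySem.List.min?_mem hm
    have hmft : m ∈ ft := (List.mem_filter.mp hmmem).1
    have hmne : m ≠ 0 := by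
      have := (List.mem_filter.mp hmmem).2
      simpa using this
    have hmin : ∀ z ∈ ft.filter (fun x => decide (x ≠ 0)), m ≤ z := by
      have := PySem.List.min?_isMin hm
      simpa using this
    have hminft : ∀ x ∈ ft, x ≠ 0 → m ≤ x := fun x hx hne =>
      hmin x (List.mem_filter.mpr ⟨hx, by simpa using hne⟩)
    by_cases hmneg : m < 0
    · -- a negative entry: A's first round is a pure downward shift of the whole list
      have hmapeq : ft.map (clampSub m) = ft.map (fun x => x - m) := by
        refine List.map_congr_left (fun x hx => ?_)
        have hxm : 0 ≤ x - m := by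
          by_cases hx0 : x = 0
          · omega
          · have := hminft x hx hx0
            omega
        unfold clampSub
        rw [if_pos hxm]
        ring
      have hbr : ¬ (k - ((ft.filter (fun x => decide (x ≠ 0))).length : Int) * m < 0) := by
        have hlen : (0:Int) ≤ ((ft.filter (fun x => decide (x ≠ 0))).length : Int) :=
          Int.natCast_nonneg _
        have := mul_nonpos_of_nonneg_of_nonpos hlen (le_of_lt hmneg)
        omega
      have hk' : k - ((ft.filter (fun x => decide (x ≠ 0))).length : Int) * m > 0 := by
        have hlen : (0:Int) ≤ ((ft.filter (fun x => decide (x ≠ 0))).length : Int) :=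
          Int.natCast_nonneg _
        have := mul_nonpos_of_nonneg_of_nonpos hlen (le_of_lt hmneg)
        omega
      have hnzeq : ft.filter notZero = ft.filter (fun x => decide (x ≠ 0)) := by rw [notZero_eq]
      have hstep := solutionLoop_step ft k m hk (by rw [hnzeq]; exact hemp)
        (by rw [hnzeq]; exact hm)
      rw [hnzeq] at hstep
      have hnn' : ∀ x ∈ ft.map (fun x => x - m), 0 ≤ x := by
        intro z hz
        rcases List.mem_map.mp hz with ⟨x, hx, rfl⟩
        by_cases hx0 : x = 0
        · omega
        · have := hminft x hx hx0
          omega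
      have hAB : solution ft k =
          solution_alt (ft.map (fun x => x - m))
            (k - ((ft.filter (fun x => decide (x ≠ 0))).length : Int) * m) := by
        unfold solution
        rw [hstep, if_neg hbr, hmapeq]
        exact main_nonneg _ _ _ rfl hnn'
      rw [hAB, solution_alt_eq_coreW, solution_alt_eq_coreW]
      unfold altCoreW
      -- the head of B's level list on the original input is m
      obtain ⟨restL, hsf⟩ : ∃ restL,
          PySem.List.sorted (PySem.Set.ofList ft) (fun x => x) false = m :: restL := by
        have hftne : ft ≠ [] := fun h => by
          subst h; exact hemp rfl
        cases h : PySem.List.sorted (PySem.Set.ofList ft) (fun x => x) false with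
        | nil => exact absurd ((PySem.List.sorted_eq_nil_iff _ _ _).mp h) (ofList_ne_nil hftne)
        | cons v0 t =>
          have hv0mem : v0 ∈ ft := by
            have : v0 ∈ PySem.List.sorted (PySem.Set.ofList ft) (fun x => x) false := by
              rw [h]; exact List.mem_cons_self
            rw [PySem.List.mem_sorted, PySem.Set.mem_ofList] at this
            exact this
          have hv0le : v0 ≤ m := by
            have := PySem.List.key_head_sorted_le _ _ h m
              ((PySem.Set.mem_ofList _ _).mpr hmft)
            simpa using this
          have hv0ne : v0 ≠ 0 := by omega
          have hmle : m ≤ v0 := hmin v0 (List.mem_filter.mpr ⟨hv0mem, by simpa using hv0ne⟩)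
          have : v0 = m := le_antisymm hv0le hmle
          subst this
          exact ⟨t, rfl⟩
      have hsf' : PySem.List.sorted (PySem.Set.ofList (ft.map (fun x => x - m)))
          (fun x => x) false = 0 :: restL.map (fun x => x - m) := by
        rw [sorted_set_shift, hsf]
        simp
      rw [hsf, hsf']
      have htot' : ((ft.map (fun x => x - m)).length : Int) = (ft.length : Int) := by
        rw [List.length_map]
      have hc0' : (List.count 0 (ft.map (fun x => x - m)) : Int) = (List.count m ft : Int) := by
        have := count_shift ft m m
        rw [show m - m = (0:Int) from by ring] at this
        exact_mod_cast this
      rw [htot', hc0']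
      have hcnt : ∀ w ∈ restL, (PySem.Dict.counter (ft.map (fun x => x - m))).getD (w - m) 0 =
          (PySem.Dict.counter ft).getD w 0 := by
        intro w _
        rw [PySem.Dict.getD_counter, PySem.Dict.getD_counter, count_shift]
      have hlenI : (List.count 0 ft : Int) +
          ((ft.filter (fun x => decide (x ≠ 0))).length : Int) = (ft.length : Int) := by
        exact_mod_cast len_nz ft
      have hA : altLevels (m :: restL) (PySem.Dict.counter ft) (ft.length : Int) k 0
          ((ft.length : Int) - (List.count 0 ft : Int)) 0 =
          altLevels restL (PySem.Dict.counter ft) (ft.length : Int)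
            (k - ((ft.filter (fun x => decide (x ≠ 0))).length : Int) * m) m
            ((ft.length : Int) - (List.count m ft : Int)) (List.count m ft : Int) := by
        simp only [altLevels]
        rw [if_neg (by omega)]
        rw [if_neg (by
          have he : (m - 0) * ((ft.length : Int) - (List.count 0 ft : Int)) =
            ((ft.filter (fun x => decide (x ≠ 0))).length : Int) * m := by
            rw [show (ft.length : Int) - (List.count 0 ft : Int) =
              ((ft.filter (fun x => decide (x ≠ 0))).length : Int) from by omega]
            ring
          rw [he]
          omega)]
        have e1 : k - (m - 0) * ((ft.length : Int) - (List.count 0 ft : Int)) =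
            k - ((ft.filter (fun x => decide (x ≠ 0))).length : Int) * m := by
          rw [show (ft.length : Int) - (List.count 0 ft : Int) =
            ((ft.filter (fun x => decide (x ≠ 0))).length : Int) from by omega]
          ring
        have e2 : (0:Int) + (PySem.Dict.counter ft).getD m 0 = (List.count m ft : Int) := by
          rw [PySem.Dict.getD_counter, zero_add]
        rw [e1, e2]
      rw [hA, altLevels_zero _ _ _ _ _ _ hk', PySem.Dict.getD_counter, hc0', zero_add]
      have hshift := altLevels_shift restL m (PySem.Dict.counter ft)
        (PySem.Dict.counter (ft.map (fun x => x - m))) hcnt (ft.length : Int)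
        (k - ((ft.filter (fun x => decide (x ≠ 0))).length : Int) * m) m
        ((ft.length : Int) - (List.count m ft : Int)) (List.count m ft : Int)
      rw [show m - m = (0:Int) from by ring] at hshift
      rw [hshift]
      set R := altLevels restL (PySem.Dict.counter ft) (ft.length : Int)
        (k - ((ft.filter (fun x => decide (x ≠ 0))).length : Int) * m) m
        ((ft.length : Int) - (List.count m ft : Int)) (List.count m ft : Int) with hRdef
      unfold altAfter
      dsimp only
      by_cases hcond : R.1 > 0 ∧ R.2.2 = false
      · rw [if_pos hcond, if_pos hcond]
      · rw [if_neg hcond, if_neg hcond]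
        exact altScan_shift ft m R.2.1 R.1 0 0
    · -- no negative entry: every value is nonnegative
      have hnn : ∀ x ∈ ft, 0 ≤ x := by
        intro x hx
        by_cases hx0 : x = 0
        · omega
        · have := hminft x hx hx0
          omega
      exact main_nonneg _ ft k rfl hnn
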